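-- pv_equiv track=rewrite | github.com/Scille/parsec-cloud | oxidation/generate_test_data/protocol/utils.py | custom_order_iter
-- ===== SOURCE A (Python) =====
-- KEYS_PRIORITY = (
--     "type",
--     "author",
--     "timestamp",
--     "name",
--     "id",
--     "version",
--     "created",
--     "updated",
-- )
--
-- def custom_order_iter(d):
--     for key in KEYS_PRIORITY:
--         try:
--             value = d[key]
--         except KeyError:
--             continue
--         yield key, value
--     for key in sorted(list(d.keys() - set(KEYS_PRIORITY))):
--         yield key, d[key]
-- ===== SOURCE B (Python) =====
-- KEYS_PRIORITY = (
--     "type",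
--     "author",
--     "timestamp",
--     "name",
--     "id",
--     "version",
--     "created",
--     "updated",
-- )
--
--
-- def custom_order_iter(d):
--     rank = {key: i for i, key in enumerate(KEYS_PRIORITY)}
--     fallback = len(KEYS_PRIORITY)
--     for key in sorted(d, key=lambda k: (rank.get(k, fallback), k)):
--         yield key, d[key]
-- ===== Notes on version B (the rewrite author's own statement) =====
-- stated objective: idiomatic
-- what changed: Replaces A's priority-loop-plus-sorted-set-complement by one sorted pass over all keys using a precomputed rank map and the tuple key (rank.get(k, len(KEYS_PRIORITY)), k).
import Mathlib
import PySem

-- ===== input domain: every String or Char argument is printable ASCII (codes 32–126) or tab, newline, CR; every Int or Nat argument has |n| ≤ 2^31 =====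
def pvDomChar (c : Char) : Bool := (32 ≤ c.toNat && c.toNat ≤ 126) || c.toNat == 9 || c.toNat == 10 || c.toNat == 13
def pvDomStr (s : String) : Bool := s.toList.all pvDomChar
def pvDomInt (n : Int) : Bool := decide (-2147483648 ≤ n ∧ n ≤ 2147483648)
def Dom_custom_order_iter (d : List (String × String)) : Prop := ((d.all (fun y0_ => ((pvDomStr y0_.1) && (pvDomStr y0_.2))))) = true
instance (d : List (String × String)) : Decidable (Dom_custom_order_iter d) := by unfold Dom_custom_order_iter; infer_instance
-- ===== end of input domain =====

-- B replaces A's priority-scan-then-sorted-complement by a single sorted pass over all keys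
-- with the tuple key (rank.get(k, len(KEYS_PRIORITY)), k) — more idiomatic, same cost.
-- Both are generators in Python; the ports return the yielded (key, value) list.

-- ===== PORT A =====
def KEYS_PRIORITY : List String :=
  ["type", "author", "timestamp", "name", "id", "version", "created", "updated"]

def custom_order_iter (d : List (String × String)) : List (String × String) :=
  let D := PySem.Dict.ofList d
  -- first loop: 'try: value = d[key] except KeyError: continue' = skip when get? is none
  let first := KEYS_PRIORITY.foldl (fun acc key =>
      match D.get? key with
      | none => acc
      | some value => acc ++ [(key, value)]) []
  -- 'sorted(list(d.keys() - set(KEYS_PRIORITY)))'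
  let rest := PySem.List.sorted
      (PySem.Set.diff (PySem.Set.ofList (PySem.Dict.keys D)) KEYS_PRIORITY) (fun k => k)
  -- 'd[key]' in the second loop never raises (key ∈ d.keys), so getD's default is unreachable
  first ++ rest.foldl (fun acc key => acc ++ [(key, D.getD key "")]) []

-- ===== PORT B =====
-- rank = {key: i for i, key in enumerate(KEYS_PRIORITY)}
def pvRank : PySem.Dict String Int :=
  PySem.Dict.ofList ((PySem.List.enumerate KEYS_PRIORITY).map (fun p => (p.2, p.1)))

-- the Python sort key (rank.get(k, fallback), k): tuples compare lexicographically = Prod.Lex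
def pvKey (k : String) : Int ×ₗ String :=
  toLex (pvRank.getD k (KEYS_PRIORITY.length : Int), k)

def custom_order_iter_alt (d : List (String × String)) : List (String × String) :=
  let D := PySem.Dict.ofList d
  -- 'for key in sorted(d, key=lambda k: (rank.get(k, fallback), k)): yield key, d[key]'
  (PySem.List.sorted (PySem.Dict.keys D) pvKey).map (fun key => (key, D.getD key ""))

-- ===== PRECONDITION & SPEC =====
def Spec_custom_order_iter (d : List (String × String)) (out : List (String × String)) : Prop := out = custom_order_iter_alt d
instance (d : List (String × String)) (out : List (String × String)) : Decidable (Spec_custom_order_iter d out) := by unfold Spec_custom_order_iter; infer_instance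

-- ===== CLAIM (what is proved, stated in full; the proofs are below) =====
def Claim_equal_custom_order_iter : Prop := ∀ (d : List (String × String)), Dom_custom_order_iter d → Spec_custom_order_iter d (custom_order_iter d)

-- ===== LEMMAS AND PROOFS =====

-- the first loop of A is the priority keys present in D, in KEYS_PRIORITY order, with their values
lemma foldA_eq_filter_map (D : PySem.Dict String String) :
    KEYS_PRIORITY.foldl (fun acc key =>
      match D.get? key with
      | none => acc
      | some value => acc ++ [(key, value)]) []
    = (KEYS_PRIORITY.filter (fun k => D.contains k)).map (fun k => (k, D.getD k "")) := by
  have hfun : (fun (acc : List (String × String)) key =>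
      match D.get? key with
      | none => acc
      | some value => acc ++ [(key, value)])
      = (fun acc key => if D.contains key then acc ++ [(key, D.getD key "")] else acc) := by
    funext acc key
    cases h : D.get? key <;>
      simp [PySem.Dict.contains_eq_isSome_get?, PySem.Dict.getD_eq_get?_getD, h]
  rw [hfun, PySem.List.foldl_append_if, List.nil_append]

lemma rank_keys : pvRank.keys = KEYS_PRIORITY := by decide

lemma rank_not_mem {k : String} (h : k ∉ KEYS_PRIORITY) :
    pvRank.getD k (KEYS_PRIORITY.length : Int) = (KEYS_PRIORITY.length : Int) := by
  apply PySem.Dict.getD_of_not_contains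
  rw [← Bool.not_eq_true, PySem.Dict.contains_iff_mem_keys, rank_keys]
  exact h

lemma rank_lt_of_mem {k : String} (h : k ∈ KEYS_PRIORITY) :
    pvRank.getD k (KEYS_PRIORITY.length : Int) < (KEYS_PRIORITY.length : Int) := by
  fin_cases h <;> decide

lemma prio_pairwise : KEYS_PRIORITY.Pairwise (fun a b => pvKey a < pvKey b) := by decide

-- the sorted pass of B is exactly A's two blocks of keys, concatenated
lemma sorted_keys_split (D : PySem.Dict String String) (hN : D.keys.Nodup) :
    PySem.List.sorted D.keys pvKey
    = KEYS_PRIORITY.filter (fun k => D.contains k)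
      ++ PySem.List.sorted
          (PySem.Set.diff (PySem.Set.ofList D.keys) KEYS_PRIORITY) (fun k => k) := by
  have hof : PySem.Set.ofList D.keys = D.keys := PySem.Set.ofList_eq_self_of_nodup _ hN
  have hdiff : PySem.Set.diff (PySem.Set.ofList D.keys) KEYS_PRIORITY
      = D.keys.filter (fun x => !PySem.Set.contains KEYS_PRIORITY x) := by
    rw [PySem.Set.diff, hof]
  have hdiffN : (PySem.Set.diff (PySem.Set.ofList D.keys) KEYS_PRIORITY).Nodup := by
    rw [hdiff]; exact hN.filter _
  have hsortN : (PySem.List.sorted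
      (PySem.Set.diff (PySem.Set.ofList D.keys) KEYS_PRIORITY) (fun k => k)).Nodup :=
    ((PySem.List.sorted_perm _ _ _).nodup_iff).mpr hdiffN
  have hmem_sort : ∀ a, a ∈ PySem.List.sorted
      (PySem.Set.diff (PySem.Set.ofList D.keys) KEYS_PRIORITY) (fun k => k)
      ↔ a ∈ D.keys ∧ a ∉ KEYS_PRIORITY := by
    intro a
    rw [PySem.List.mem_sorted, hdiff, List.mem_filter]
    simp [PySem.Set.contains]
  have hmem_fil : ∀ a, a ∈ KEYS_PRIORITY.filter (fun k => D.contains k)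
      ↔ a ∈ KEYS_PRIORITY ∧ a ∈ D.keys := by
    intro a
    rw [List.mem_filter, PySem.Dict.contains_iff_mem_keys]
  apply PySem.List.sorted_eq_of_perm_of_pairwise_lt
  · -- permutation with D.keys
    rw [List.perm_ext_iff_of_nodup _ hN]
    · intro a
      rw [List.mem_append, hmem_sort, hmem_fil]
      by_cases hk : a ∈ KEYS_PRIORITY <;> simp [hk]
    · rw [List.nodup_append]
      refine ⟨(by decide : KEYS_PRIORITY.Nodup).filter _, hsortN, ?_⟩
      intro a ha b hb hab
      subst hab
      exact ((hmem_sort a).mp hb).2 ((hmem_fil a).mp ha).1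
  · -- strictly increasing under pvKey
    rw [List.pairwise_append]
    refine ⟨prio_pairwise.sublist List.filter_sublist, ?_, ?_⟩
    · -- within the sorted complement: keys agree on rank, strings strictly increase
      have hle := PySem.List.sorted_pairwise
        (PySem.Set.diff (PySem.Set.ofList D.keys) KEYS_PRIORITY) (fun k => k)
      have hne := hsortN
      rw [List.Nodup] at hne
      refine (hle.and hne).imp_of_mem ?_
      intro a b ha hb hr
      have hna : a ∉ KEYS_PRIORITY := ((hmem_sort a).mp ha).2
      have hnb : b ∉ KEYS_PRIORITY := ((hmem_sort b).mp hb).2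
      rw [pvKey, pvKey, Prod.Lex.toLex_lt_toLex]
      exact Or.inr ⟨by rw [rank_not_mem hna, rank_not_mem hnb],
        lt_of_le_of_ne hr.1 hr.2⟩
    · -- priority block strictly before the complement: rank < fallback = rank
      intro a ha b hb
      have hma : a ∈ KEYS_PRIORITY := ((hmem_fil a).mp ha).1
      have hnb : b ∉ KEYS_PRIORITY := ((hmem_sort b).mp hb).2
      rw [pvKey, pvKey, Prod.Lex.toLex_lt_toLex]
      exact Or.inl (by rw [rank_not_mem hnb]; exact rank_lt_of_mem hma)

-- ===== VERDICT (by name: the statement is the Claim_ definition above) =====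
theorem custom_order_iter_spec : Claim_equal_custom_order_iter := by
  intro d _
  unfold Spec_custom_order_iter custom_order_iter custom_order_iter_alt
  simp only [foldA_eq_filter_map, PySem.List.foldl_append_singleton_eq_map, List.nil_append,
    sorted_keys_split _ (PySem.Dict.nodup_keys_ofList d), List.map_append]
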